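-- pv_equiv track=rewrite | github.com/SteveFreeBSD/wicap-assistant | src/wicap_assist/wicap_env_setup.py | _default_capture_interface
-- ===== SOURCE A (Python) =====
-- from typing import Callable, Sequence
--
-- def _default_capture_interface(
--     wireless_interfaces: Sequence[str],
--     management_interface: str | None,
-- ) -> str:
--     if not wireless_interfaces:
--         return "auto"
--
--     mgmt = management_interface or ""
--     non_mgmt = [item for item in wireless_interfaces if item != mgmt]
--     preferred_usb = [item for item in non_mgmt if item.startswith("wlx")]
--     preferred_internal = [item for item in non_mgmt if not item.startswith("wlo")]
--
--     if preferred_usb: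
--         return preferred_usb[0]
--     if preferred_internal:
--         return preferred_internal[0]
--     if non_mgmt:
--         return non_mgmt[0]
--     return wireless_interfaces[0]
-- ===== SOURCE B (Python) =====
-- def _default_capture_interface(wireless_interfaces, management_interface):
--     if not wireless_interfaces:
--         return "auto"
--     mgmt = management_interface or ""
--
--     def rank(item):
--         if item == mgmt:
--             return 3
--         if item.startswith("wlx"):
--             return 0
--         if item.startswith("wlo"):
--             return 2
--         return 1
--
--     return min(wireless_interfaces, key=rank)
-- ===== Notes on version B (the rewrite author's own statement) =====
-- stated objective: alternative
-- what changed: Replaces A's three staged filter passes and priority cascade with a scoring function assigning each interface a preference rank (USB 0, generic 1, internal-wlo 2, management 3) and a single stable argmin over the list.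
import Mathlib
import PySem

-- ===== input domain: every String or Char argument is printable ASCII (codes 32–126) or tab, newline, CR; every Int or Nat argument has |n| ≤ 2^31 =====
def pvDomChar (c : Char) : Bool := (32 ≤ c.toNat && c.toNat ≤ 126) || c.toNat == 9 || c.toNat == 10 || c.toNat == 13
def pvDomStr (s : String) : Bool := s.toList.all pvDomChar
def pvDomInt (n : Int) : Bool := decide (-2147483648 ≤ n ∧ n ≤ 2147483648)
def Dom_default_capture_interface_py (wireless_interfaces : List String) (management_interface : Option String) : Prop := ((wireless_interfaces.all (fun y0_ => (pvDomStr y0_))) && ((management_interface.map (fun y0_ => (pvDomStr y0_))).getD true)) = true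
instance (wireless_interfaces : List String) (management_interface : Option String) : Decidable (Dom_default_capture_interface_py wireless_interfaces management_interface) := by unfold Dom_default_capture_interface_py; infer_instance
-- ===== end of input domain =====

-- B replaces A's staged filter passes and priority cascade with a preference-rank function and one stable argmin (objective: alternative); return values proved equal on the whole domain.
-- ===== PORT A =====
def default_capture_interface_py (wireless_interfaces : List String) (management_interface : Option String) : String :=
  if wireless_interfaces = [] then "auto"
  else
    let mgmt := management_interface.getD ""
    let non_mgmt := wireless_interfaces.filter (fun item => item != mgmt)
    let preferred_usb := non_mgmt.filter (fun item => PySem.Str.startswith item "wlx")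
    let preferred_internal := non_mgmt.filter (fun item => !(PySem.Str.startswith item "wlo"))
    match preferred_usb with
    | u :: _ => u
    | [] =>
      match preferred_internal with
      | i :: _ => i
      | [] =>
        match non_mgmt with
        | n :: _ => n
        | [] => wireless_interfaces.headI

-- ===== PORT B =====
def dciRank (mgmt item : String) : Nat :=
  if item = mgmt then 3
  else if PySem.Str.startswith item "wlx" then 0
  else if PySem.Str.startswith item "wlo" then 2
  else 1

def default_capture_interface_py_alt (wireless_interfaces : List String) (management_interface : Option String) : String :=
  if wireless_interfaces = [] then "auto"
  else
    let mgmt := management_interface.getD ""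
    match PySem.List.min? wireless_interfaces (dciRank mgmt) with
    | some m => m
    | none => "auto"   -- unreachable: the list is nonempty

-- ===== PRECONDITION & SPEC =====
def Spec_default_capture_interface_py (wireless_interfaces : List String) (management_interface : Option String) (out : String) : Prop := out = default_capture_interface_py_alt wireless_interfaces management_interface
instance (wireless_interfaces : List String) (management_interface : Option String) (out : String) : Decidable (Spec_default_capture_interface_py wireless_interfaces management_interface out) := by unfold Spec_default_capture_interface_py; infer_instance

-- ===== CLAIM (what is proved, stated in full; the proofs are below) =====
def Claim_equal_default_capture_interface_py : Prop := ∀ (wireless_interfaces : List String) (management_interface : Option String), Dom_default_capture_interface_py wireless_interfaces management_interface → Spec_default_capture_interface_py wireless_interfaces management_interface (default_capture_interface_py wireless_interfaces management_interface)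

-- ===== LEMMAS AND PROOFS =====

-- first element of m::l achieving the minimal rank (ranks are in {0,1,2,3})
def dciPick (r : String → Nat) (m : String) (l : List String) : String :=
  if r m = 0 then m
  else match l.filter (fun x => r x == 0) with
  | y :: _ => y
  | [] =>
    if r m ≤ 1 then m
    else match l.filter (fun x => r x == 1) with
    | y :: _ => y
    | [] =>
      if r m ≤ 2 then m
      else match l.filter (fun x => r x == 2) with
      | y :: _ => y
      | [] => m

theorem dciRank_cases (mgmt x : String) :
    dciRank mgmt x = 0 ∨ dciRank mgmt x = 1 ∨ dciRank mgmt x = 2 ∨ dciRank mgmt x = 3 := by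
  unfold dciRank; split_ifs <;> simp

theorem min?_fold_char (mgmt : String) (f : Option String → String → Option String)
    (hf : ∀ m x, f (some m) x = if dciRank mgmt x < dciRank mgmt m then some x else some m)
    (l : List String) (m : String) :
    List.foldl f (some m) l = some (dciPick (dciRank mgmt) m l) := by
  induction l generalizing m with
  | nil =>
    rcases dciRank_cases mgmt m with h | h | h | h <;> simp [dciPick, h]
  | cons x t ih =>
    simp only [List.foldl_cons, hf]
    rcases dciRank_cases mgmt m with hm | hm | hm | hm <;>
      rcases dciRank_cases mgmt x with hx | hx | hx | hx <;>
      simp only [hm, hx] <;> norm_num <;>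
      rw [ih] <;>
      simp [dciPick, hm, hx]

theorem min?_char (mgmt : String) (a : String) (t : List String) :
    PySem.List.min? (a :: t) (dciRank mgmt) = some (dciPick (dciRank mgmt) a t) := by
  simp only [PySem.List.min?, List.foldl_cons]
  exact min?_fold_char mgmt _ (fun m x => rfl) t a

-- rank-0 elements are exactly A's preferred_usb elements
theorem filter_rank0 (mgmt : String) (l : List String) :
    l.filter (fun x => dciRank mgmt x == 0) =
      (l.filter (fun x => x != mgmt)).filter (fun x => PySem.Str.startswith x "wlx") := by
  rw [List.filter_filter]
  apply List.filter_congr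
  intro x _
  by_cases h : x = mgmt
  · simp [dciRank, h]
  · cases hw : PySem.Str.startswith x "wlx"
    · cases ho : PySem.Str.startswith x "wlo" <;>
        simp at hw ho <;> simp [dciRank, h, hw, ho]
    · simp at hw
      simp [dciRank, h, hw]

-- when no rank-0 element exists, rank-1 elements are exactly A's preferred_internal elements
theorem filter_rank1 (mgmt : String) (l : List String)
    (h0 : l.filter (fun x => dciRank mgmt x == 0) = []) :
    l.filter (fun x => dciRank mgmt x == 1) =
      (l.filter (fun x => x != mgmt)).filter (fun x => !(PySem.Str.startswith x "wlo")) := by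
  rw [List.filter_filter]
  apply List.filter_congr
  intro x hx
  have hz : ¬ (dciRank mgmt x = 0) := by
    intro he
    have : x ∈ l.filter (fun x => dciRank mgmt x == 0) := by
      simp [List.mem_filter, hx, he]
    simp [h0] at this
  by_cases h : x = mgmt
  · simp [dciRank, h]
  · cases hw : PySem.Str.startswith x "wlx"
    · cases ho : PySem.Str.startswith x "wlo" <;>
        simp at hw ho <;> simp [dciRank, h, hw, ho]
    · simp at hw
      exact absurd (by simp [dciRank, h, hw]) hz
-- when no rank-0 and no rank-1 element exists, rank-2 elements are exactly A's non_mgmt elements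
theorem filter_rank2 (mgmt : String) (l : List String)
    (h0 : l.filter (fun x => dciRank mgmt x == 0) = [])
    (h1 : l.filter (fun x => dciRank mgmt x == 1) = []) :
    l.filter (fun x => dciRank mgmt x == 2) = l.filter (fun x => x != mgmt) := by
  apply List.filter_congr
  intro x hx
  have hz : ¬ (dciRank mgmt x = 0) := by
    intro he
    have : x ∈ l.filter (fun x => dciRank mgmt x == 0) := by simp [List.mem_filter, hx, he]
    simp [h0] at this
  have hone : ¬ (dciRank mgmt x = 1) := by
    intro he
    have : x ∈ l.filter (fun x => dciRank mgmt x == 1) := by simp [List.mem_filter, hx, he]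
    simp [h1] at this
  by_cases hm : x = mgmt
  · simp [dciRank, hm]
  · cases hw : PySem.Str.startswith x "wlx"
    · cases ho : PySem.Str.startswith x "wlo"
      · simp at hw ho
        exact absurd (by simp [dciRank, hm, hw, ho]) hone
      · simp at hw ho
        simp [dciRank, hm, hw, ho]
    · simp at hw
      exact absurd (by simp [dciRank, hm, hw]) hz

-- ===== VERDICT (by name: the statement is the Claim_ definition above) =====
theorem default_capture_interface_py_spec : Claim_equal_default_capture_interface_py := by
  intro wi mi _
  unfold Spec_default_capture_interface_py
  unfold default_capture_interface_py default_capture_interface_py_alt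
  cases wi with
  | nil => rfl
  | cons a t =>
    simp only [reduceCtorEq, if_false, min?_char]
    set mgmt := mi.getD "" with hmg
    rw [← filter_rank0 mgmt (a :: t)]
    by_cases hAm : a = mgmt
    · have ra : dciRank mgmt a = 3 := by simp [dciRank, hAm]
      rw [List.filter_cons_of_neg (by simp [ra])]
      cases hF0 : t.filter (fun x => dciRank mgmt x == 0) with
      | cons y ys => simp [dciPick, ra, hF0]
      | nil =>
        have h0 : (a :: t).filter (fun x => dciRank mgmt x == 0) = [] := by
          rw [List.filter_cons_of_neg (by simp [ra]), hF0]
        rw [← filter_rank1 mgmt (a :: t) h0, List.filter_cons_of_neg (by simp [ra])]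
        cases hF1 : t.filter (fun x => dciRank mgmt x == 1) with
        | cons y ys => simp [dciPick, ra, hF0, hF1]
        | nil =>
          have h1 : (a :: t).filter (fun x => dciRank mgmt x == 1) = [] := by
            rw [List.filter_cons_of_neg (by simp [ra]), hF1]
          rw [← filter_rank2 mgmt (a :: t) h0 h1, List.filter_cons_of_neg (by simp [ra])]
          cases hF2 : t.filter (fun x => dciRank mgmt x == 2) with
          | cons y ys => simp [dciPick, ra, hF0, hF1, hF2]
          | nil => simp [dciPick, ra, hF0, hF1, hF2]
    · cases hax : PySem.Str.startswith a "wlx"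
      · cases hao : PySem.Str.startswith a "wlo"
        · -- rank 1
          simp at hax hao
          have ra : dciRank mgmt a = 1 := by simp [dciRank, hAm, hax, hao]
          rw [List.filter_cons_of_neg (by simp [ra])]
          cases hF0 : t.filter (fun x => dciRank mgmt x == 0) with
          | cons y ys => simp [dciPick, ra, hF0]
          | nil =>
            have h0 : (a :: t).filter (fun x => dciRank mgmt x == 0) = [] := by
              rw [List.filter_cons_of_neg (by simp [ra]), hF0]
            rw [← filter_rank1 mgmt (a :: t) h0, List.filter_cons_of_pos (by simp [ra])]
            simp [dciPick, ra, hF0]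
        · -- rank 2
          simp at hax hao
          have ra : dciRank mgmt a = 2 := by simp [dciRank, hAm, hax, hao]
          rw [List.filter_cons_of_neg (by simp [ra])]
          cases hF0 : t.filter (fun x => dciRank mgmt x == 0) with
          | cons y ys => simp [dciPick, ra, hF0]
          | nil =>
            have h0 : (a :: t).filter (fun x => dciRank mgmt x == 0) = [] := by
              rw [List.filter_cons_of_neg (by simp [ra]), hF0]
            rw [← filter_rank1 mgmt (a :: t) h0, List.filter_cons_of_neg (by simp [ra])]
            cases hF1 : t.filter (fun x => dciRank mgmt x == 1) with
            | cons y ys => simp [dciPick, ra, hF0, hF1]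
            | nil =>
              have h1 : (a :: t).filter (fun x => dciRank mgmt x == 1) = [] := by
                rw [List.filter_cons_of_neg (by simp [ra]), hF1]
              rw [← filter_rank2 mgmt (a :: t) h0 h1, List.filter_cons_of_pos (by simp [ra])]
              simp [dciPick, ra, hF0, hF1]
      · -- rank 0
        simp at hax
        have ra : dciRank mgmt a = 0 := by simp [dciRank, hAm, hax]
        rw [List.filter_cons_of_pos (by simp [ra])]
        simp [dciPick, ra]
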